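-- pv_equiv track=rewrite | github.com/rmffpaps98/CodingTest | 프로그래머스/2/138476. 귤 고르기/귤 고르기.py | solution
-- ===== SOURCE A (Python) =====
-- def solution(k, tangerine):
--     answer = 0
--
--     tan_d = {}
--     for i in tangerine:
--         if i in tan_d:
--             tan_d[i] += 1
--         else:
--             tan_d[i] = 1
--
--     tan_d = sorted(tan_d.items(), key=lambda x: x[1], reverse=True)
--
--     for size, count in tan_d:
--         if k > 0:
--             k -= count
--             answer += 1
--         else :
--             break
--
--     return answer
-- ===== SOURCE B (Python) =====
-- def solution(k, tangerine):
--     counts = {}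
--     for t in tangerine:
--         counts[t] = counts.get(t, 0) + 1
--     if k <= 0 or not counts:
--         return 0
--     hist = {}
--     for c in counts.values():
--         hist[c] = hist.get(c, 0) + 1
--     answer = 0
--     c = max(hist)
--     while c >= 1 and k > 0:
--         n = hist.get(c, 0)
--         while n > 0 and k > 0:
--             k -= c
--             answer += 1
--             n -= 1
--         c -= 1
--     return answer
-- ===== Notes on version B (the rewrite author's own statement) =====
-- stated objective: alternative
-- what changed: A sorts the (size, count) pairs by count and walks them; B never sorts: it builds a count-frequency histogram and sweeps it from the largest count downwards, consuming whole buckets while k > 0.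
import Mathlib
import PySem

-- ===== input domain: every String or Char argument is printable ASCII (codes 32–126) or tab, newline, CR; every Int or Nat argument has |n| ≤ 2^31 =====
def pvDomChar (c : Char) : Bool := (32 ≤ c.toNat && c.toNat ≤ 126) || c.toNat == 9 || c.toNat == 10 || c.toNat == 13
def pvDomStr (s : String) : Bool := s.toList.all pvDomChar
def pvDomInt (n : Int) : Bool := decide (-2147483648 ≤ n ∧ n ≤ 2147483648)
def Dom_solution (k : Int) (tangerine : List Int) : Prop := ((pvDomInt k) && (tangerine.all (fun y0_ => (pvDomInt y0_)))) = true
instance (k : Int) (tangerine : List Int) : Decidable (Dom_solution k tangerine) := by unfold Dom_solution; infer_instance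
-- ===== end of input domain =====

-- B replaces A's sort of the (size, count) pairs by a count-frequency histogram swept from the
-- largest count downwards (an alternative data structure; no sorting involved).

-- ===== PORT A =====
-- A's final for-loop over the sorted (size, count) pairs, with its break
def solAGo : Int → Int → List (Int × Int) → Int
  | _, answer, [] => answer
  | k, answer, (_, count) :: rest =>
      if k > 0 then solAGo (k - count) (answer + 1) rest else answer

def solution (k : Int) (tangerine : List Int) : Int :=
  let tan_d : PySem.Dict Int Int :=
    tangerine.foldl (fun d i =>
      if d.contains i then d.insert i (d.getD i 0 + 1) else d.insert i 1)
      PySem.Dict.empty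
  let tan_d' := PySem.List.sorted tan_d.items (fun x => x.2) true
  solAGo k 0 tan_d'

-- ===== PORT B =====
-- inner 'while n > 0 and k > 0' loop; fuel = n.toNat; returns (k, answer)
def solBInner (c : Int) : Nat → Int → Int → Int × Int
  | 0, k, answer => (k, answer)
  | n + 1, k, answer =>
      if k > 0 then solBInner c n (k - c) (answer + 1) else (k, answer)

-- outer 'while c >= 1 and k > 0' loop; fuel = c.toNat
def solBOuter (hist : PySem.Dict Int Int) : Nat → Int → Int → Int → Int
  | 0, _, _, answer => answer
  | fuel + 1, c, k, answer =>
      if k > 0 then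
        let p := solBInner c (hist.getD c 0).toNat k answer
        solBOuter hist fuel (c - 1) p.1 p.2
      else answer

def solution_alt (k : Int) (tangerine : List Int) : Int :=
  let counts : PySem.Dict Int Int :=
    tangerine.foldl (fun d t => d.insert t (d.getD t 0 + 1)) PySem.Dict.empty
  if k ≤ 0 ∨ counts.keys = [] then 0
  else
    let hist : PySem.Dict Int Int :=
      counts.values.foldl (fun d c => d.insert c (d.getD c 0 + 1)) PySem.Dict.empty
    -- max(hist): keys are nonempty here, so Python's max never raises; getD 0 is never used
    let M := (PySem.List.max? hist.keys (fun x => x)).getD 0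
    solBOuter hist M.toNat M k 0

-- ===== PRECONDITION & SPEC =====
def Spec_solution (k : Int) (tangerine : List Int) (out : Int) : Prop := out = solution_alt k tangerine
instance (k : Int) (tangerine : List Int) (out : Int) : Decidable (Spec_solution k tangerine out) := by unfold Spec_solution; infer_instance

-- ===== CLAIM (what is proved, stated in full; the proofs are below) =====
def Claim_equal_solution : Prop := ∀ (k : Int) (tangerine : List Int), Dom_solution k tangerine → Spec_solution k tangerine (solution k tangerine)

-- ===== LEMMAS AND PROOFS =====

-- the common core: consume counts in the given order while k > 0
def consume : Int → Int → List Int → Int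
  | _, answer, [] => answer
  | k, answer, c :: rest => if k > 0 then consume (k - c) (answer + 1) rest else answer

-- the descending count list B's sweep consumes: replicate hist[c] copies of c, then c-1, …
def blocks (hist : PySem.Dict Int Int) : Nat → Int → List Int
  | 0, _ => []
  | fuel + 1, c => List.replicate (hist.getD c 0).toNat c ++ blocks hist fuel (c - 1)

lemma consume_nonpos (l : List Int) (k answer : Int) (h : ¬ k > 0) :
    consume k answer l = answer := by
  cases l <;> simp [consume, h]

lemma solAGo_eq_consume (l : List (Int × Int)) : ∀ k answer : Int,
    solAGo k answer l = consume k answer (l.map Prod.snd) := by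
  induction l with
  | nil => intro k a; rfl
  | cons p rest ih =>
      intro k a
      obtain ⟨s, c⟩ := p
      by_cases h : k > 0 <;> simp [solAGo, consume, h, ih]

lemma solBInner_consume (c : Int) : ∀ (n : Nat) (k answer : Int) (rest : List Int),
    consume k answer (List.replicate n c ++ rest)
      = consume (solBInner c n k answer).1 (solBInner c n k answer).2 rest := by
  intro n
  induction n with
  | zero => intro k a rest; simp [solBInner]
  | succ m ih =>
      intro k a rest
      by_cases h : k > 0
      · rw [List.replicate_succ]
        simp only [List.cons_append, consume, solBInner, if_pos h]
        exact ih (k - c) (a + 1) rest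
      · simp [solBInner, h, consume_nonpos _ _ _ h]

lemma solBOuter_eq_consume (hist : PySem.Dict Int Int) : ∀ (fuel : Nat) (c k answer : Int),
    solBOuter hist fuel c k answer = consume k answer (blocks hist fuel c) := by
  intro fuel
  induction fuel with
  | zero => intro c k a; rfl
  | succ m ih =>
      intro c k a
      by_cases h : k > 0
      · simp only [solBOuter, h, if_pos, blocks]
        rw [solBInner_consume, ih]
      · simp [solBOuter, h, consume_nonpos _ _ _ h]

lemma mem_blocks (hist : PySem.Dict Int Int) : ∀ (fuel : Nat) (c x : Int),
    x ∈ blocks hist fuel c → c - fuel < x ∧ x ≤ c := by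
  intro fuel
  induction fuel with
  | zero => intro c x hx; simp [blocks] at hx
  | succ m ih =>
      intro c x hx
      simp only [blocks, List.mem_append, List.mem_replicate] at hx
      rcases hx with ⟨-, rfl⟩ | hx
      · omega
      · have := ih (c - 1) x hx; omega

lemma blocks_pairwise (hist : PySem.Dict Int Int) : ∀ (fuel : Nat) (c : Int),
    (blocks hist fuel c).Pairwise (fun a b => b ≤ a) := by
  intro fuel
  induction fuel with
  | zero => intro c; simp [blocks]
  | succ m ih =>
      intro c
      simp only [blocks]
      refine List.pairwise_append.mpr ⟨?_, ih (c - 1), ?_⟩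
      · exact List.pairwise_replicate.mpr (Or.inr le_rfl)
      · intro a ha b hb
        have ha' := (List.mem_replicate.mp ha).2
        have := mem_blocks hist m (c - 1) b hb
        omega

lemma count_blocks (hist : PySem.Dict Int Int) : ∀ (fuel : Nat) (c v : Int),
    (blocks hist fuel c).count v
      = if c - fuel < v ∧ v ≤ c then (hist.getD v 0).toNat else 0 := by
  intro fuel
  induction fuel with
  | zero => intro c v; simp [blocks]
  | succ m ih =>
      intro c v
      rcases eq_or_ne c v with rfl | hne
      · simp only [blocks, List.count_append, ih (c - 1) c, List.count_replicate_self]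
        split_ifs <;> omega
      · have hb : (c == v) = false := beq_eq_false_iff_ne.mpr hne
        simp only [blocks, List.count_append, ih (c - 1) v, List.count_replicate, hb,
          Bool.false_eq_true, if_false, zero_add]
        split_ifs <;> omega

lemma countDict_eq_counter (tangerine : List Int) :
    tangerine.foldl (fun d i =>
      if d.contains i then d.insert i (d.getD i 0 + 1) else d.insert i 1)
      PySem.Dict.empty = PySem.Dict.counter tangerine := by
  rw [← PySem.Dict.foldl_insert_getD_add_one_eq_counter]
  apply PySem.List.foldl_congr_mem
  intro d x _
  by_cases h : d.contains x
  · simp [h]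
  · have h' : d.contains x = false := by simpa using h
    have h2 : d.get? x = none := by
      have := PySem.Dict.contains_eq_isSome_get? d x
      rw [h'] at this
      exact Option.not_isSome_iff_eq_none.mp (by simp [← this])
    simp [h', PySem.Dict.getD, h2]

theorem solution_spec' : ∀ (k : Int) (tangerine : List Int),
    solution k tangerine = solution_alt k tangerine := by
  intro k tangerine
  simp only [solution, solution_alt, countDict_eq_counter,
    PySem.Dict.foldl_insert_getD_add_one_eq_counter]
  set C := PySem.Dict.counter tangerine with hC
  set V := C.values with hV
  set H := PySem.Dict.counter V with hH
  rw [solAGo_eq_consume]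
  by_cases hk : k ≤ 0
  · rw [if_pos (Or.inl hk), consume_nonpos _ _ _ (by omega)]
  by_cases ht : tangerine = []
  · subst ht
    have hk0 : C.keys = [] := by rw [hC]; rfl
    rw [if_pos (Or.inr hk0)]
    have hi0 : C.items = [] := by rw [hC]; rfl
    rw [hi0]
    rfl
  -- main case
  have hne : C.keys ≠ [] := by
    rw [hC, PySem.Dict.keys_counter]
    intro h
    rcases List.exists_mem_of_ne_nil tangerine ht with ⟨x, hx⟩
    have := (PySem.Set.mem_ofList tangerine x).mpr hx
    simp [h] at this
  rw [if_neg (by push_neg; exact ⟨by omega, hne⟩)]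
  -- V nonempty
  have hVeq : V = C.items.map Prod.snd := rfl
  have hVne : V ≠ [] := by
    rw [hVeq, hC, PySem.Dict.items_counter]
    intro h
    rcases List.exists_mem_of_ne_nil tangerine ht with ⟨x, hx⟩
    have hx' := (PySem.Set.mem_ofList tangerine x).mpr hx
    simp at h
    simp [h] at hx'
  have hKne : H.keys ≠ [] := by
    rw [hH, PySem.Dict.keys_counter]
    intro h
    rcases List.exists_mem_of_ne_nil V hVne with ⟨x, hx⟩
    have := (PySem.Set.mem_ofList V x).mpr hx
    simp [h] at this
  obtain ⟨M, hM⟩ : ∃ M, PySem.List.max? H.keys (fun x => x) = some M := by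
    rcases h : PySem.List.max? H.keys (fun x => x) with _ | M
    · exact absurd ((PySem.List.max?_eq_none_iff _ _).mp h) hKne
    · exact ⟨M, rfl⟩
  rw [hM]
  simp only [Option.getD_some]
  rw [solBOuter_eq_consume]
  -- facts about V's elements
  have hpos : ∀ v ∈ V, 1 ≤ v := by
    intro v hv
    rw [hVeq, hC, PySem.Dict.items_counter, List.map_map] at hv
    rcases List.mem_map.mp hv with ⟨x, hx, rfl⟩
    have hmem : x ∈ tangerine := (PySem.Set.mem_ofList tangerine x).mp hx
    have hcp : 0 < tangerine.count x := List.count_pos_iff.mpr hmem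
    simp only [Function.comp]
    exact_mod_cast hcp
  have hle : ∀ v ∈ V, v ≤ M := by
    intro v hv
    have : v ∈ H.keys := by
      rw [hH, PySem.Dict.keys_counter]
      exact (PySem.Set.mem_ofList V v).mpr hv
    exact PySem.List.max?_isMax hM v this
  have hM1 : 1 ≤ M := by
    have : M ∈ H.keys := PySem.List.max?_mem hM
    rw [hH, PySem.Dict.keys_counter] at this
    exact hpos M ((PySem.Set.mem_ofList V M).mp this)
  -- the two descending lists are equal
  have hperm : ((PySem.List.sorted C.items (fun x => x.2) true).map Prod.snd).Perm
      (blocks H M.toNat M) := by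
    have p1 : ((PySem.List.sorted C.items (fun x => x.2) true).map Prod.snd).Perm V := by
      rw [hVeq]
      exact (PySem.List.sorted_perm C.items (fun x => x.2) true).map Prod.snd
    have p2 : (blocks H M.toNat M).Perm V := by
      rw [List.perm_iff_count]
      intro v
      rw [count_blocks]
      have hMt : M - (M.toNat : Int) = 0 := by omega
      rw [hMt]
      by_cases hvr : 0 < v ∧ v ≤ M
      · rw [if_pos hvr, hH, PySem.Dict.getD_counter]
        simp
      · rw [if_neg hvr]
        symm
        rw [List.count_eq_zero]
        intro hmem
        exact hvr ⟨by have := hpos v hmem; omega, hle v hmem⟩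
    exact p1.trans p2.symm
  have hs1 : ((PySem.List.sorted C.items (fun x => x.2) true).map Prod.snd).Pairwise
      (fun a b => b ≤ a) := by
    rw [List.pairwise_map]
    exact PySem.List.sorted_pairwise_rev C.items (fun x => x.2)
  have heq : (PySem.List.sorted C.items (fun x => x.2) true).map Prod.snd
      = blocks H M.toNat M :=
    List.eq_of_perm_of_sorted (fun a b _ _ h1 h2 => le_antisymm h2 h1)
      hs1 (blocks_pairwise H M.toNat M) hperm
  rw [heq]

-- ===== VERDICT (by name: the statement is the Claim_ definition above) =====
theorem solution_spec : Claim_equal_solution := by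
  intro k tangerine _
  unfold Spec_solution
  exact solution_spec' k tangerine
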